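-- pv_equiv track=rewrite | github.com/ArtemisLin/wechat-pet | pet/assets_manager.py | get_unlocked_keys
-- ===== SOURCE A (Python) =====
-- STAGE_UNLOCKS = {
--     "baby":  ["base", "idle", "happy", "sleeping"],
--     "child": ["eating", "bathing"],
--     "teen":  ["playing", "exploring"],
--     "adult": ["sick"],
-- }
--
-- def get_unlocked_keys(stage):
--     """返回指定阶段及之前所有已解锁的图片 key 列表。"""
--     stages_order = ["baby", "child", "teen", "adult"]
--     unlocked = []
--     for s in stages_order:
--         unlocked.extend(STAGE_UNLOCKS.get(s, []))
--         if s == stage: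
--             break
--     return unlocked
-- ===== SOURCE B (Python) =====
-- STAGE_UNLOCKS = {
--     "baby":  ["base", "idle", "happy", "sleeping"],
--     "child": ["eating", "bathing"],
--     "teen":  ["playing", "exploring"],
--     "adult": ["sick"],
-- }
--
-- # Precomputed once: cumulative unlock table, stage -> every key unlocked up to
-- # and including that stage; unknown stages fall back to the full list.
-- _CUMULATIVE = {}
-- _acc = []
-- for _s in ["baby", "child", "teen", "adult"]:
--     _acc = _acc + STAGE_UNLOCKS.get(_s, [])
--     _CUMULATIVE[_s] = _acc
-- _ALL = _acc
--
-- def get_unlocked_keys(stage):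
--     return list(_CUMULATIVE.get(stage, _ALL))
-- ===== Notes on version B (the rewrite author's own statement) =====
-- stated objective: alternative
-- what changed: Replaced the per-call accumulate-and-break loop with a cumulative prefix table precomputed once at module load, so each call is a single dict lookup (defaulting to the full list for unknown stages).
import Mathlib
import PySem

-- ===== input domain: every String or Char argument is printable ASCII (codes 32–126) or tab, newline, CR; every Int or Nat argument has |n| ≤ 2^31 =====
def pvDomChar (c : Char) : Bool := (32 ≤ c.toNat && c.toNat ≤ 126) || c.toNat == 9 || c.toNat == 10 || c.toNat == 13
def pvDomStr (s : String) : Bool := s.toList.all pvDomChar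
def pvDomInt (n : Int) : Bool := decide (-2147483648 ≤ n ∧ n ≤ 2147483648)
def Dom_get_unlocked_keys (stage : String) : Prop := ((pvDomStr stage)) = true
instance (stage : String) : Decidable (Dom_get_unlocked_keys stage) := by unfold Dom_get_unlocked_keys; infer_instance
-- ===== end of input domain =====

-- B precomputes a cumulative unlock table once (stage -> full key prefix, plus the full
-- list for unknown stages), so each call is a single dict lookup instead of A's loop.

-- ===== PORT A =====
def stageUnlocks : PySem.Dict String (List String) :=
  PySem.Dict.ofList [("baby", ["base", "idle", "happy", "sleeping"]),
   ("child", ["eating", "bathing"]),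
   ("teen", ["playing", "exploring"]),
   ("adult", ["sick"])]

-- A's for-loop with a break: structural recursion over the remaining stages with the accumulator.
def aLoop (stage : String) : List String → List String → List String
  | [], unlocked => unlocked
  | s :: rest, unlocked =>
    let unlocked := unlocked ++ PySem.Dict.getD stageUnlocks s []
    if s == stage then unlocked else aLoop stage rest unlocked

def get_unlocked_keys (stage : String) : List String :=
  aLoop stage ["baby", "child", "teen", "adult"] []

-- ===== PORT B =====
-- Source B's module-level precomputation loop: builds (_CUMULATIVE, _acc) over the stage order.
def cumulTable : PySem.Dict String (List String) × List String :=
  (["baby", "child", "teen", "adult"]).foldl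
    (fun st s =>
      let acc := st.2 ++ PySem.Dict.getD stageUnlocks s []
      (PySem.Dict.insert st.1 s acc, acc))
    (PySem.Dict.ofList [], [])

def get_unlocked_keys_alt (stage : String) : List String :=
  PySem.Dict.getD cumulTable.1 stage cumulTable.2

-- ===== PRECONDITION & SPEC =====
def Spec_get_unlocked_keys (stage : String) (out : List String) : Prop := out = get_unlocked_keys_alt stage
instance (stage : String) (out : List String) : Decidable (Spec_get_unlocked_keys stage out) := by unfold Spec_get_unlocked_keys; infer_instance

-- ===== CLAIM =====
def Claim_equal_get_unlocked_keys : Prop := ∀ (stage : String), Dom_get_unlocked_keys stage → Spec_get_unlocked_keys stage (get_unlocked_keys stage)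

-- ===== LEMMAS AND PROOFS =====

-- ===== VERDICT =====
theorem get_unlocked_keys_spec : Claim_equal_get_unlocked_keys := by
  intro stage _
  show get_unlocked_keys stage = get_unlocked_keys_alt stage
  by_cases h1 : stage = "baby"; · subst h1; rfl
  by_cases h2 : stage = "child"; · subst h2; rfl
  by_cases h3 : stage = "teen"; · subst h3; rfl
  by_cases h4 : stage = "adult"; · subst h4; rfl
  have b1 : ("baby" == stage) = false := by simp [Ne.symm h1]
  have b2 : ("child" == stage) = false := by simp [Ne.symm h2]
  have b3 : ("teen" == stage) = false := by simp [Ne.symm h3]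
  have b4 : ("adult" == stage) = false := by simp [Ne.symm h4]
  have e1 : PySem.Dict.getD stageUnlocks "baby" ([] : List String) = ["base","idle","happy","sleeping"] := by decide
  have e2 : PySem.Dict.getD stageUnlocks "child" ([] : List String) = ["eating","bathing"] := by decide
  have e3 : PySem.Dict.getD stageUnlocks "teen" ([] : List String) = ["playing","exploring"] := by decide
  have e4 : PySem.Dict.getD stageUnlocks "adult" ([] : List String) = ["sick"] := by decide
  have hA : get_unlocked_keys stage =
      ["base","idle","happy","sleeping","eating","bathing","playing","exploring","sick"] := by
    simp only [get_unlocked_keys, aLoop, b1, b2, b3, b4, e1, e2, e3, e4, if_false,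
      Bool.false_eq_true, List.nil_append, List.append_assoc]
    rfl
  have hT : cumulTable =
      (((((PySem.Dict.ofList []).insert "baby" ["base","idle","happy","sleeping"]).insert "child"
          ["base","idle","happy","sleeping","eating","bathing"]).insert "teen"
          ["base","idle","happy","sleeping","eating","bathing","playing","exploring"]).insert "adult"
          ["base","idle","happy","sleeping","eating","bathing","playing","exploring","sick"],
        ["base","idle","happy","sleeping","eating","bathing","playing","exploring","sick"]) := by decide
  rw [hA, get_unlocked_keys_alt, hT]
  simp only [PySem.Dict.getD_insert, if_neg h1, if_neg h2, if_neg h3, if_neg h4]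
  simp [PySem.Dict.ofList, PySem.Dict.update, PySem.Dict.getD, PySem.Dict.get?, PySem.Dict.empty]
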